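-- pv_equiv track=rewrite | github.com/badboys88888/IPTV | udp/update_iptv.py | replace_in_txt_genre
-- ===== SOURCE A (Python) =====
-- def replace_in_txt_genre(txt_text, group_name, new_host):
--     """
--     在 TXT 文本中，找到 #genre# 分隔的 group_name 分组，替换该分组下所有频道的 IP。
--     TXT 格式示例：
--         浙江电信[A] #genre#
--         频道1,http://old_ip/udp/stream
--         频道2,http://old_ip/udp/stream
--     """
--     lines = txt_text.splitlines()
--     new_lines = []
--     in_group = False
--     for line in lines:
--         if group_name in line and "#genre#" in line:
--             in_group = True
--             new_lines.append(line)
--             continue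
--         if in_group and "#genre#" in line:   # 遇到下一个 genre 则退出
--             in_group = False
--             new_lines.append(line)
--             continue
--         if in_group and "," in line:
--             # 频道名,URL 格式
--             parts = line.split(",", 1)
--             name = parts[0]
--             old_url = parts[1]
--             if "/udp/" in old_url:
--                 stream = old_url.split("/udp/")[-1].strip()
--                 new_lines.append(f"{name},http://{new_host}/udp/{stream}")
--             else:
--                 new_lines.append(line)
--         else:
--             new_lines.append(line)
--     return "\n".join(new_lines)
-- ===== SOURCE B (Python) =====
-- def _rewrite_channel(line, new_host):
--     """Rewrite one channel line 'name,url' whose url contains /udp/; else return it unchanged."""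
--     if "," in line:
--         name, old_url = line.split(",", 1)
--         if "/udp/" in old_url:
--             stream = old_url.split("/udp/")[-1].strip()
--             return f"{name},http://{new_host}/udp/{stream}"
--     return line
--
-- def replace_in_txt_genre(txt_text, group_name, new_host):
--     # Phase 1: cut the text into blocks, one per '#genre#' header (plus a headerless leading block).
--     blocks = []
--     header, body = None, []
--     for line in txt_text.splitlines():
--         if "#genre#" in line:
--             blocks.append((header, body))
--             header, body = line, []
--         else:
--             body.append(line)
--     blocks.append((header, body))
--     # Phase 2: render blocks; only bodies under a matching header are rewritten.
--     out = []
--     for header, body in blocks: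
--         if header is not None:
--             out.append(header)
--         if header is not None and group_name in header:
--             out.extend(_rewrite_channel(l, new_host) for l in body)
--         else:
--             out.extend(body)
--     return "\n".join(out)
-- ===== Notes on version B (the rewrite author's own statement) =====
-- stated objective: alternative
-- what changed: A's single stateful scan with an in_group flag is replaced by a two-phase pipeline: phase 1 cuts the text into blocks at each '#genre#' header, phase 2 renders each block, rewriting channel lines only in blocks whose header contains group_name, then joins.
import Mathlib
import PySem

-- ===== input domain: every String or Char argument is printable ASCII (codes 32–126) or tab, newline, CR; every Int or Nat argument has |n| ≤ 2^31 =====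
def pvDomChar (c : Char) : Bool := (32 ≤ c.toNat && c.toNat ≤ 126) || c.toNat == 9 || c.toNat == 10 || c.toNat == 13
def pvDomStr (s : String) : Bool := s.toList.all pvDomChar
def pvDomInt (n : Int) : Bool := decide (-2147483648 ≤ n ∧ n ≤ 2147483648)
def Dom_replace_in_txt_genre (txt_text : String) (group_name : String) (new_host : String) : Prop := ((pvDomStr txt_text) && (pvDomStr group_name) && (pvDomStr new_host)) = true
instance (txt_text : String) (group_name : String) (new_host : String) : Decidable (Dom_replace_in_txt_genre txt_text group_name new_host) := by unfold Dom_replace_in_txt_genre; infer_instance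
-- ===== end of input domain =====

-- B restructures A's single flag-carrying scan as a two-phase pipeline (cut into '#genre#' blocks,
-- then render each block); objective: alternative decomposition, same cost, return value proved equal.

-- ===== PORT A =====
-- A: one pass with an in_group flag, appending to new_lines.
def replace_in_txt_genre (txt_text : String) (group_name : String) (new_host : String) : String :=
  let lines := PySem.Str.splitlines txt_text
  let st := lines.foldl (fun (st : Bool × List String) line =>
    if PySem.Str.isIn group_name line && PySem.Str.isIn "#genre#" line then
      (true, st.2 ++ [line])
    else if st.1 && PySem.Str.isIn "#genre#" line then
      (false, st.2 ++ [line])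
    else if st.1 && PySem.Str.isIn "," line then
      -- parts = line.split(",", 1); sep ≠ "" and "," ∈ line give exactly two parts
      let parts := (PySem.Str.splitMax? line "," 1).getD []
      let name := PySem.List.pyGetD parts 0 ""
      let old_url := PySem.List.pyGetD parts 1 ""
      if PySem.Str.isIn "/udp/" old_url then
        let stream := PySem.Str.strip (PySem.List.pyGetD ((PySem.Str.split? old_url "/udp/").getD []) (-1) "")
        (st.1, st.2 ++ [name ++ ",http://" ++ new_host ++ "/udp/" ++ stream])
      else (st.1, st.2 ++ [line])
    else (st.1, st.2 ++ [line])) (false, [])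
  PySem.Str.join "\n" st.2

-- ===== PORT B =====
-- _rewrite_channel from Source B
def pvRewriteChannel (new_host : String) (line : String) : String :=
  if PySem.Str.isIn "," line then
    let parts := (PySem.Str.splitMax? line "," 1).getD []
    let name := PySem.List.pyGetD parts 0 ""
    let old_url := PySem.List.pyGetD parts 1 ""
    if PySem.Str.isIn "/udp/" old_url then
      let stream := PySem.Str.strip (PySem.List.pyGetD ((PySem.Str.split? old_url "/udp/").getD []) (-1) "")
      name ++ ",http://" ++ new_host ++ "/udp/" ++ stream
    else line
  else line

-- Phase-1 loop body: state = (finished blocks, current header, current body)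
def pvBlocksStep (st : List (Option String × List String) × Option String × List String)
    (line : String) : List (Option String × List String) × Option String × List String :=
  if PySem.Str.isIn "#genre#" line then (st.1 ++ [(st.2.1, st.2.2)], some line, [])
  else (st.1, st.2.1, st.2.2 ++ [line])

-- Phase-2 rendering of one block
def pvRenderBlock (group_name new_host : String) (blk : Option String × List String) : List String :=
  blk.1.toList ++
    (if (match blk.1 with | none => false | some h => PySem.Str.isIn group_name h) then
      blk.2.map (pvRewriteChannel new_host)
    else blk.2)

def replace_in_txt_genre_alt (txt_text : String) (group_name : String) (new_host : String) : String :=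
  let st := (PySem.Str.splitlines txt_text).foldl pvBlocksStep ([], none, [])
  let blocks := st.1 ++ [(st.2.1, st.2.2)]
  PySem.Str.join "\n" (blocks.flatMap (pvRenderBlock group_name new_host))

-- ===== PRECONDITION & SPEC =====
def Spec_replace_in_txt_genre (txt_text : String) (group_name : String) (new_host : String) (out : String) : Prop := out = replace_in_txt_genre_alt txt_text group_name new_host
instance (txt_text : String) (group_name : String) (new_host : String) (out : String) : Decidable (Spec_replace_in_txt_genre txt_text group_name new_host out) := by unfold Spec_replace_in_txt_genre; infer_instance

-- ===== CLAIM (what is proved, stated in full; the proofs are below) =====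
def Claim_equal_replace_in_txt_genre : Prop := ∀ (txt_text : String) (group_name : String) (new_host : String), Dom_replace_in_txt_genre txt_text group_name new_host → Spec_replace_in_txt_genre txt_text group_name new_host (replace_in_txt_genre txt_text group_name new_host)

-- ===== LEMMAS AND PROOFS =====

-- Recursive form of A's scan (output lines only).
def pvAScan (group_name new_host : String) : Bool → List String → List String
  | _, [] => []
  | b, l :: ls =>
    if PySem.Str.isIn group_name l && PySem.Str.isIn "#genre#" l then
      l :: pvAScan group_name new_host true ls
    else if b && PySem.Str.isIn "#genre#" l then
      l :: pvAScan group_name new_host false ls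
    else if b && PySem.Str.isIn "," l then
      pvRewriteChannel new_host l :: pvAScan group_name new_host b ls
    else l :: pvAScan group_name new_host b ls

lemma pvAScan_foldl (group_name new_host : String) (ls : List String) :
    ∀ (b : Bool) (acc : List String),
      (ls.foldl (fun (st : Bool × List String) line =>
        if PySem.Str.isIn group_name line && PySem.Str.isIn "#genre#" line then
          (true, st.2 ++ [line])
        else if st.1 && PySem.Str.isIn "#genre#" line then
          (false, st.2 ++ [line])
        else if st.1 && PySem.Str.isIn "," line then
          let parts := (PySem.Str.splitMax? line "," 1).getD []
          let name := PySem.List.pyGetD parts 0 ""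
          let old_url := PySem.List.pyGetD parts 1 ""
          if PySem.Str.isIn "/udp/" old_url then
            let stream := PySem.Str.strip (PySem.List.pyGetD ((PySem.Str.split? old_url "/udp/").getD []) (-1) "")
            (st.1, st.2 ++ [name ++ ",http://" ++ new_host ++ "/udp/" ++ stream])
          else (st.1, st.2 ++ [line])
        else (st.1, st.2 ++ [line])) (b, acc)).2
      = acc ++ pvAScan group_name new_host b ls := by
  induction ls with
  | nil => intro b acc; simp [pvAScan]
  | cons l ls ih =>
    intro b acc
    simp only [List.foldl_cons, pvAScan]
    split_ifs with h1 h2 h3 h4 <;> rw [ih] <;>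
      simp_all [pvRewriteChannel, List.append_assoc]

-- Recursive form of B's phase-1 block builder.
def pvBBlocks (hdr : Option String) (body : List String) :
    List String → List (Option String × List String)
  | [] => [(hdr, body)]
  | l :: ls =>
    if PySem.Str.isIn "#genre#" l then (hdr, body) :: pvBBlocks (some l) [] ls
    else pvBBlocks hdr (body ++ [l]) ls

lemma pvBBlocks_foldl (ls : List String) :
    ∀ (blocks : List (Option String × List String)) (hdr : Option String) (body : List String),
      (ls.foldl pvBlocksStep (blocks, hdr, body)).1
        ++ [((ls.foldl pvBlocksStep (blocks, hdr, body)).2.1,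
             (ls.foldl pvBlocksStep (blocks, hdr, body)).2.2)]
      = blocks ++ pvBBlocks hdr body ls := by
  induction ls with
  | nil => intro blocks hdr body; simp [pvBBlocks]
  | cons l ls ih =>
    intro blocks hdr body
    simp only [List.foldl_cons, pvBlocksStep, pvBBlocks]
    split_ifs with h <;> simp [ih]

-- header-activity flag of a pending block
def pvAct (group_name : String) : Option String → Bool
  | none => false
  | some h => PySem.Str.isIn group_name h

-- Main bridge: rendering B's blocks equals A's scan, given the pending block's contribution.
lemma pvRender_bblocks (group_name new_host : String) (ls : List String) :
    ∀ (hdr : Option String) (body : List String),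
      (pvBBlocks hdr body ls).flatMap (pvRenderBlock group_name new_host)
      = hdr.toList
        ++ (if pvAct group_name hdr then body.map (pvRewriteChannel new_host) else body)
        ++ pvAScan group_name new_host (pvAct group_name hdr) ls := by
  induction ls with
  | nil =>
    intro hdr body
    cases hdr <;> simp [pvBBlocks, pvRenderBlock, pvAct, pvAScan]
  | cons l ls ih =>
    intro hdr body
    rcases hdr with _ | h
    · by_cases hg : PySem.Str.isIn "#genre#" l = true <;>
        by_cases hgr : PySem.Str.isIn group_name l = true <;>
          by_cases hc : PySem.Str.isIn "," l = true <;>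
            simp_all [pvBBlocks, pvAScan, pvRenderBlock, pvAct]
    · by_cases hb : PySem.Str.isIn group_name h = true <;>
        by_cases hg : PySem.Str.isIn "#genre#" l = true <;>
          by_cases hgr : PySem.Str.isIn group_name l = true <;>
            by_cases hc : PySem.Str.isIn "," l = true <;>
              simp_all [pvBBlocks, pvAScan, pvRenderBlock, pvRewriteChannel, pvAct]

-- ===== VERDICT (by name: the statement is the Claim_ definition above) =====
theorem replace_in_txt_genre_spec : Claim_equal_replace_in_txt_genre := by
  intro txt_text group_name new_host _
  show _ = _
  simp only [replace_in_txt_genre, replace_in_txt_genre_alt]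
  rw [pvAScan_foldl group_name new_host (PySem.Str.splitlines txt_text) false [],
      pvBBlocks_foldl (PySem.Str.splitlines txt_text) [] none []]
  simp only [List.nil_append]
  rw [pvRender_bblocks group_name new_host (PySem.Str.splitlines txt_text) none []]
  simp [pvAct]
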